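-- pv_equiv track=rewrite | github.com/burning-calamity/op-message-encryptor-and-ecryptor | encripter.py | runningkey_encrypt
-- ===== SOURCE A (Python) =====
-- def _shift_char(c, shift):
--     if 'A' <= c <= 'Z': return chr((ord(c)-65 + shift) % 26 + 65)
--     if 'a' <= c <= 'z': return chr((ord(c)-97 + shift) % 26 + 97)
--     return c
--
-- def runningkey_encrypt(text, key_text):
--     key_letters=[k for k in (key_text or '') if k.isalpha()]
--     if not key_letters: raise ValueError("Running key needs letters")
--     res=[]; ki=0
--     for c in text:
--         if c.isalpha():
--             k=key_letters[ki%len(key_letters)]; shift=(ord(k.lower())-97)%26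
--             res.append(_shift_char(c, shift)); ki+=1
--         else: res.append(c)
--     return ''.join(res)
-- ===== SOURCE B (Python) =====
-- def _shift_char(c, shift):
--     if 'A' <= c <= 'Z': return chr((ord(c)-65 + shift) % 26 + 65)
--     if 'a' <= c <= 'z': return chr((ord(c)-97 + shift) % 26 + 97)
--     return c
--
-- def runningkey_encrypt(text, key_text):
--     key_letters = [k for k in (key_text or '') if k.isalpha()]
--     if not key_letters:
--         raise ValueError("Running key needs letters")
--     n = len(key_letters)
--     letters = [c for c in text if c.isalpha()]
--     enc = [_shift_char(c, (ord(key_letters[i % n].lower()) - 97) % 26)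
--            for i, c in enumerate(letters)]
--     it = iter(enc)
--     return ''.join(next(it) if c.isalpha() else c for c in text)
-- ===== Notes on version B (the rewrite author's own statement) =====
-- stated objective: alternative
-- what changed: Replaces the single index-threaded loop over text with a gather->map->merge pipeline: extract the letters, encrypt them all in one indexed comprehension against the key, then reassemble by consuming the encrypted letters from an iterator while copying non-letters through.
import Mathlib
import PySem

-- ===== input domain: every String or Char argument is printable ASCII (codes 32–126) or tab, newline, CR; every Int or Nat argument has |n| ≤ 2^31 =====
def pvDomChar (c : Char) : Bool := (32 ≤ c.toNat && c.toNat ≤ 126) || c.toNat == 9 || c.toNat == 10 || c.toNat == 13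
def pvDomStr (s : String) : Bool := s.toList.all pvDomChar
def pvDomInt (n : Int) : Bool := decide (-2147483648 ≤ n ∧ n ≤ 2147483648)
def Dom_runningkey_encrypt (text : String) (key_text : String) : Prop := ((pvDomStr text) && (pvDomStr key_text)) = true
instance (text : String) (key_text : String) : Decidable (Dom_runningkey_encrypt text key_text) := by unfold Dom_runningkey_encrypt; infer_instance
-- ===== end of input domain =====

-- B re-implements the running-key cipher as a gather->map->merge pipeline instead of A's
-- single index-threaded loop (objective: alternative; same cost).

-- ===== PORT A =====
-- Python str.isalpha / str.lower on one char; on the ASCII inputs admitted by Dom these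
-- coincide exactly with the ASCII letter test / ASCII lowering used here.
def pvIsAlpha (c : Char) : Bool := ('A' ≤ c && c ≤ 'Z') || ('a' ≤ c && c ≤ 'z')

def pvLower (c : Char) : Char := if 'A' ≤ c && c ≤ 'Z' then Char.ofNat (c.toNat + 32) else c

-- _shift_char, step for step
def pvShiftChar (c : Char) (shift : Nat) : Char :=
  if 'A' ≤ c && c ≤ 'Z' then Char.ofNat ((c.toNat - 65 + shift) % 26 + 65)
  else if 'a' ≤ c && c ≤ 'z' then Char.ofNat ((c.toNat - 97 + shift) % 26 + 97)
  else c

-- shift = (ord(key_letters[ki % len(key_letters)].lower()) - 97) % 26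
def pvKeyShift (keyl : List Char) (ki : Nat) : Nat :=
  ((pvLower (keyl.getD (ki % keyl.length) 'a')).toNat - 97) % 26

-- A's for-loop over text with state (res, ki)
def pvLoopA (keyl : List Char) (cs : List Char) (res : List Char) (ki : Nat) : List Char :=
  match cs with
  | [] => res
  | c :: rest =>
      if pvIsAlpha c then pvLoopA keyl rest (res ++ [pvShiftChar c (pvKeyShift keyl ki)]) (ki + 1)
      else pvLoopA keyl rest (res ++ [c]) ki

def runningkey_encrypt (text : String) (key_text : String) : String :=
  let key_letters := key_text.toList.filter pvIsAlpha
  if key_letters = [] then ""   -- dead branch: Python raises ValueError here; excluded by Pre_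
  else String.ofList (pvLoopA key_letters text.toList [] 0)

-- ===== PORT B =====
-- ''.join(next(it) if c.isalpha() else c for c in text): consume enc in order at each letter
def pvMergeB (cs : List Char) (enc : List Char) : List Char :=
  match cs with
  | [] => []
  | c :: rest =>
      if pvIsAlpha c then
        match enc with
        | k :: es => k :: pvMergeB rest es
        | [] => c :: pvMergeB rest []   -- unreachable: enc holds one char per letter of cs
      else c :: pvMergeB rest enc

def runningkey_encrypt_alt (text : String) (key_text : String) : String :=
  let key_letters := key_text.toList.filter pvIsAlpha
  if key_letters = [] then ""   -- dead branch: Python raises ValueError here; excluded by Pre_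
  else
    let letters := text.toList.filter pvIsAlpha
    let enc := letters.zipIdx.map (fun p => pvShiftChar p.1 (pvKeyShift key_letters p.2))
    String.ofList (pvMergeB text.toList enc)

-- ===== PRECONDITION & SPEC =====
-- Both A and B raise ValueError("Running key needs letters") when the key contains no letters;
-- within the ASCII domain Dom (where Python's isalpha is exactly the ASCII letter test) Pre_
-- excludes exactly those raising inputs and nothing else.
def Pre_runningkey_encrypt (text : String) (key_text : String) : Prop :=
  key_text.toList.filter pvIsAlpha ≠ []
instance (text : String) (key_text : String) : Decidable (Pre_runningkey_encrypt text key_text) := by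
  unfold Pre_runningkey_encrypt; infer_instance

def pvWitness_runningkey_encrypt : String × String := ("Hello, World!", "key")

def Spec_runningkey_encrypt (text : String) (key_text : String) (out : String) : Prop :=
  out = runningkey_encrypt_alt text key_text
instance (text : String) (key_text : String) (out : String) : Decidable (Spec_runningkey_encrypt text key_text out) := by
  unfold Spec_runningkey_encrypt; infer_instance

-- ===== CLAIM (what is proved, stated in full; the proofs are below) =====
def Claim_equal_runningkey_encrypt : Prop := ∀ (text : String) (key_text : String), Dom_runningkey_encrypt text key_text → Pre_runningkey_encrypt text key_text → Spec_runningkey_encrypt text key_text (runningkey_encrypt text key_text)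

-- ===== LEMMAS AND PROOFS =====

-- A's loop from state (res, ki) produces res ++ B's merge of the encrypted letters (indexed from ki).
theorem pvLoopA_eq_merge (keyl : List Char) (cs : List Char) (res : List Char) (ki : Nat) :
    pvLoopA keyl cs res ki =
      res ++ pvMergeB cs (((cs.filter pvIsAlpha).zipIdx ki).map
        (fun p => pvShiftChar p.1 (pvKeyShift keyl p.2))) := by
  induction cs generalizing res ki with
  | nil => simp [pvLoopA, pvMergeB]
  | cons c rest ih =>
      by_cases h : pvIsAlpha c
      · simp [pvLoopA, pvMergeB, h, List.zipIdx_cons, ih]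
      · simp [pvLoopA, pvMergeB, h, ih]

-- ===== VERDICT (by name: the statement is the Claim_ definition above) =====
theorem runningkey_encrypt_spec : Claim_equal_runningkey_encrypt := by
  intro text key_text _ hpre
  unfold Spec_runningkey_encrypt runningkey_encrypt runningkey_encrypt_alt
  simp only [if_neg hpre]
  rw [pvLoopA_eq_merge]
  simp
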